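-- pv_equiv track=rewrite | github.com/MrBrantCode/unitest_baseline | mut_generate/mist_train_cf/cf_70594/solution.py | advanced_sequence
-- ===== SOURCE A (Python) =====
-- def advanced_sequence(lst):
--     strng = ''.join(lst)
--
--     alphabets = []
--     numbers = []
--
--     for num_alpha in strng:
--         if num_alpha.isalpha():
--             alphabets.append(num_alpha)
--             # check if 'numbers' list is in decreasing order
--             if numbers and numbers != sorted(numbers, reverse=True):
--                 return 'No'
--             numbers = [] # empty the list for next number sequence
--         if num_alpha.isdigit():
--             numbers.append(num_alpha)
--             # check if 'alphabets' list in in decreasing order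
--             if alphabets and alphabets != sorted(alphabets, reverse=True):
--                 return 'No'
--             alphabets = [] # empty the list for next alphabet sequence
--
--     # handle the possible last sequence of numbers and alphabets
--     if (numbers and numbers != sorted(numbers, reverse=True)) or \
--        (alphabets and alphabets != sorted(alphabets, reverse=True)):
--         return 'No'
--
--     return 'Yes'
-- ===== SOURCE B (Python) =====
-- def advanced_sequence(lst):
--     prev = None
--     for ch in ''.join(lst):
--         if ch.isalpha() or ch.isdigit():
--             if prev is not None and (prev.isalpha() == ch.isalpha()) and prev < ch:
--                 return 'No'
--             prev = ch
--     return 'Yes'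
-- ===== Notes on version B (the rewrite author's own statement) =====
-- stated objective: faster
-- what changed: Replaces A's run-accumulating lists that are re-sorted at every character (sorted(..., reverse=True) inside the loop) with a single pass that keeps only the previous alphanumeric character and rejects as soon as a same-type adjacent pair increases.
import Mathlib
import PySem

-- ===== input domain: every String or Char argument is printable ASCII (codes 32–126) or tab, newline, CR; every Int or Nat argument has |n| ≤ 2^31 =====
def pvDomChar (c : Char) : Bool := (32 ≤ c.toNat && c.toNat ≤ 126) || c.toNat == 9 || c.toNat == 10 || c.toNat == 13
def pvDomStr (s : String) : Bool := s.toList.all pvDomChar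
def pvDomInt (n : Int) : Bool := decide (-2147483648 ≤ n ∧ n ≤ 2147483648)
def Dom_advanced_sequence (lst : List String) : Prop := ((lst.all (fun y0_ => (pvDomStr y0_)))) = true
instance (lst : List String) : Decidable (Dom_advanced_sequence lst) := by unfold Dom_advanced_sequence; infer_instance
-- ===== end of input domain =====

-- B replaces A's per-character re-sorting of accumulated runs by a single pass
-- that compares each alphanumeric character with the previous one (asymptotically faster).


-- ===== PORT A =====
-- sorted(l, reverse=True)
def pvSortedDesc (l : List Char) : List Char := PySem.List.sorted l (fun c => c) true

-- the for-loop of A, state = (alphabets, numbers); early 'return "No"' = returning "No"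
def pvALoop : List Char → List Char → List Char → String
  | [], alphabets, numbers =>
      -- trailing check + final 'return "Yes"'
      if (numbers ≠ [] ∧ numbers ≠ pvSortedDesc numbers) ∨
         (alphabets ≠ [] ∧ alphabets ≠ pvSortedDesc alphabets) then "No" else "Yes"
  | na :: rest, alphabets, numbers =>
      if PySem.Chars.isalpha na then
        -- alphabets.append(na); check numbers; numbers = []
        if numbers ≠ [] ∧ numbers ≠ pvSortedDesc numbers then "No"
        else pvALoop rest (alphabets ++ [na]) []
      else if PySem.Chars.isdigit na then
        -- numbers.append(na); check alphabets; alphabets = []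
        -- (the two Python 'if's are mutually exclusive: no char is both alpha and digit)
        if alphabets ≠ [] ∧ alphabets ≠ pvSortedDesc alphabets then "No"
        else pvALoop rest [] (numbers ++ [na])
      else pvALoop rest alphabets numbers

def advanced_sequence (lst : List String) : String :=
  pvALoop (lst.flatMap String.toList) [] []   -- ''.join(lst), iterated character by character

-- ===== PORT B =====
-- the for-loop of B, state = prev (last alphanumeric character seen)
def pvBLoop : List Char → Option Char → String
  | [], _ => "Yes"
  | ch :: rest, prev =>
      if PySem.Chars.isalpha ch || PySem.Chars.isdigit ch then
        match prev with
        | some p =>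
            if (PySem.Chars.isalpha p == PySem.Chars.isalpha ch) && decide (p < ch) then "No"
            else pvBLoop rest (some ch)
        | none => pvBLoop rest (some ch)
      else pvBLoop rest prev

def advanced_sequence_alt (lst : List String) : String :=
  pvBLoop (lst.flatMap String.toList) none

-- ===== PRECONDITION & SPEC =====
def Spec_advanced_sequence (lst : List String) (out : String) : Prop := out = advanced_sequence_alt lst
instance (lst : List String) (out : String) : Decidable (Spec_advanced_sequence lst out) := by unfold Spec_advanced_sequence; infer_instance

-- ===== CLAIM (what is proved, stated in full; the proofs are below) =====
def Claim_equal_advanced_sequence : Prop := ∀ (lst : List String), Dom_advanced_sequence lst → Spec_advanced_sequence lst (advanced_sequence lst)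

-- ===== LEMMAS AND PROOFS =====

theorem pvSortedDesc_self_iff (l : List Char) :
    l = pvSortedDesc l ↔ l.Pairwise (fun a b : Char => b ≤ a) := by
  constructor
  · intro h
    have hp := PySem.List.sorted_pairwise_rev l (fun c => c)
    unfold pvSortedDesc at h
    rwa [← h] at hp
  · intro h
    exact (PySem.List.sorted_rev_eq_self_of_pairwise l (fun c => c) h).symm

theorem pvViol_iff (l : List Char) :
    (l ≠ [] ∧ l ≠ pvSortedDesc l) ↔ ¬ l.Pairwise (fun a b : Char => b ≤ a) := by
  constructor
  · rintro ⟨_, h2⟩ hp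
    exact h2 ((pvSortedDesc_self_iff l).2 hp)
  · intro hnp
    refine ⟨?_, ?_⟩
    · rintro rfl; exact hnp List.Pairwise.nil
    · intro h; exact hnp ((pvSortedDesc_self_iff l).1 h)

theorem pvAlpha_not_digit (c : Char) (h : PySem.Chars.isalpha c = true) :
    PySem.Chars.isdigit c = false := by
  simp only [PySem.Chars.isalpha, PySem.Chars.isupper, PySem.Chars.islower,
    Bool.or_eq_true, Bool.and_eq_true, decide_eq_true_eq] at h
  simp only [PySem.Chars.isdigit, Bool.and_eq_false_iff, decide_eq_false_iff_not]
  rcases h with ⟨h1, _⟩ | ⟨h1, _⟩ <;> right <;>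
    exact not_le.2 (lt_of_lt_of_le (by decide) h1)

theorem pvLast_min (l : List Char) (p : Char)
    (hp : l.getLast? = some p) (h : l.Pairwise (fun a b : Char => b ≤ a)) :
    ∀ a ∈ l, p ≤ a := by
  rcases List.getLast?_eq_some_iff.1 hp with ⟨ys, rfl⟩
  rw [List.pairwise_append] at h
  intro a ha
  rcases List.mem_append.1 ha with ha | ha
  · exact h.2.2 a ha p (List.mem_singleton_self p)
  · rw [List.mem_singleton.1 ha]

theorem pvLoop_eq : ∀ (cs al nums : List Char),
    (al = [] ∨ nums = []) →
    (∀ c ∈ al, PySem.Chars.isalpha c = true) →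
    (∀ c ∈ nums, PySem.Chars.isdigit c = true) →
    pvALoop cs al nums =
      if al.Pairwise (fun a b : Char => b ≤ a) ∧ nums.Pairwise (fun a b : Char => b ≤ a)
      then pvBLoop cs (al ++ nums).getLast? else "No" := by
  intro cs
  induction cs with
  | nil =>
      intro al nums _ _ _
      by_cases hA : al.Pairwise (fun a b : Char => b ≤ a) <;>
        by_cases hN : nums.Pairwise (fun a b : Char => b ≤ a) <;>
          simp [pvALoop, pvBLoop, pvViol_iff, hA, hN]
  | cons c rest ih =>
      intro al nums hdisj hal hnums
      by_cases hca : PySem.Chars.isalpha c = true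
      · -- alpha character
        rcases (em (nums = [])) with hn0 | hn0
        · -- current run is the alpha run (or empty)
          subst hn0
          have hstep := ih (al ++ [c]) []
            (Or.inr rfl)
            (by intro x hx; rcases List.mem_append.1 hx with hx | hx
                · exact hal x hx
                · rw [List.mem_singleton.1 hx]; exact hca)
            (by intro x hx; cases hx)
          simp only [pvALoop, hca, if_true, ne_eq, not_true_eq_false, false_and, if_false,
            List.append_nil, List.Pairwise.nil, and_true] at hstep ⊢
          rw [hstep]
          rcases hlast : al.getLast? with _ | p
          · -- al = []
            have : al = [] := List.getLast?_eq_none_iff.1 hlast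
            subst this
            simp [pvBLoop, hca]
          · -- al = ys ++ [p]
            have hpal : p ∈ al := List.mem_of_getLast? hlast
            have hpa : PySem.Chars.isalpha p = true := hal p hpal
            by_cases hA : al.Pairwise (fun a b : Char => b ≤ a)
            · have hmin := pvLast_min al p hlast hA
              by_cases hpc : p < c
              · -- increasing pair: both sides "No"
                have hviol : ¬ (al ++ [c]).Pairwise (fun a b : Char => b ≤ a) := by
                  rw [List.pairwise_append]
                  rintro ⟨_, _, h3⟩
                  exact absurd (h3 p hpal c (List.mem_singleton_self c)) (not_le.2 hpc)
                simp [hviol, pvBLoop, hca, hpa, hpc, hA]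
              · -- non-increasing: both continue
                have hok : (al ++ [c]).Pairwise (fun a b : Char => b ≤ a) := by
                  rw [List.pairwise_append]
                  refine ⟨hA, List.pairwise_singleton _ _, ?_⟩
                  intro x hx y hy
                  rw [List.mem_singleton.1 hy]
                  exact le_trans (not_lt.1 hpc) (hmin x hx)
                simp [hok, pvBLoop, hca, hpa, hpc, hA, hlast]
            · -- run already violated: A recurses but will answer "No"; RHS is "No"
              have hviol : ¬ (al ++ [c]).Pairwise (fun a b : Char => b ≤ a) := by
                rw [List.pairwise_append]; rintro ⟨h1, _, _⟩; exact hA h1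
              simp [hviol, hA]
        · -- a digit run is pending: A checks it now
          have ha0 : al = [] := by rcases hdisj with h | h; exact h; exact absurd h hn0
          subst ha0
          simp only [pvALoop, hca, if_true]
          by_cases hN : nums.Pairwise (fun a b : Char => b ≤ a)
          · have hc1 : ¬ (nums ≠ [] ∧ nums ≠ pvSortedDesc nums) := by
              rw [pvViol_iff]; exact not_not_intro hN
            rw [if_neg hc1]
            simp only [List.nil_append]
            have hstep := ih [c] []
              (Or.inr rfl)
              (by intro x hx; rw [List.mem_singleton.1 hx]; exact hca)
              (by intro x hx; cases hx)
            rw [hstep]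
            rcases hlast : nums.getLast? with _ | p
            · exact absurd (List.getLast?_eq_none_iff.1 hlast) hn0
            · have hpd : PySem.Chars.isdigit p = true := hnums p (List.mem_of_getLast? hlast)
              have hpa : PySem.Chars.isalpha p = false := by
                by_contra hx
                have := pvAlpha_not_digit p (by simpa using hx)
                simp [this] at hpd
              simp [pvBLoop, hca, hpa, hN]
          · have hc1 : nums ≠ [] ∧ nums ≠ pvSortedDesc nums := (pvViol_iff nums).2 hN
            rw [if_pos hc1]
            simp [hN]
      · by_cases hcd : PySem.Chars.isdigit c = true
        · -- digit character (mirror)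
          have hca' : PySem.Chars.isalpha c = false := by
            by_contra hx
            have := pvAlpha_not_digit c (by simpa using hx)
            simp [this] at hcd
          rcases (em (al = [])) with ha0 | ha0
          · subst ha0
            have hstep := ih [] (nums ++ [c])
              (Or.inl rfl)
              (by intro x hx; cases hx)
              (by intro x hx; rcases List.mem_append.1 hx with hx | hx
                  · exact hnums x hx
                  · rw [List.mem_singleton.1 hx]; exact hcd)
            simp only [pvALoop, hca', Bool.false_eq_true, if_false, hcd, if_true, ne_eq,
              not_true_eq_false, false_and, if_false, List.nil_append, List.Pairwise.nil,
              true_and] at hstep ⊢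
            rw [hstep]
            rcases hlast : nums.getLast? with _ | p
            · have : nums = [] := List.getLast?_eq_none_iff.1 hlast
              subst this
              simp [pvBLoop, hca', hcd]
            · have hpnum : p ∈ nums := List.mem_of_getLast? hlast
              have hpd : PySem.Chars.isdigit p = true := hnums p hpnum
              have hpa : PySem.Chars.isalpha p = false := by
                by_contra hx
                have := pvAlpha_not_digit p (by simpa using hx)
                simp [this] at hpd
              by_cases hN : nums.Pairwise (fun a b : Char => b ≤ a)
              · have hmin := pvLast_min nums p hlast hN
                by_cases hpc : p < c
                · have hviol : ¬ (nums ++ [c]).Pairwise (fun a b : Char => b ≤ a) := by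
                    rw [List.pairwise_append]
                    rintro ⟨_, _, h3⟩
                    exact absurd (h3 p hpnum c (List.mem_singleton_self c)) (not_le.2 hpc)
                  simp [hviol, pvBLoop, hca', hcd, hpa, hpc, hN]
                · have hok : (nums ++ [c]).Pairwise (fun a b : Char => b ≤ a) := by
                    rw [List.pairwise_append]
                    refine ⟨hN, List.pairwise_singleton _ _, ?_⟩
                    intro x hx y hy
                    rw [List.mem_singleton.1 hy]
                    exact le_trans (not_lt.1 hpc) (hmin x hx)
                  simp [hok, pvBLoop, hca', hcd, hpa, hpc, hN, hlast]
              · have hviol : ¬ (nums ++ [c]).Pairwise (fun a b : Char => b ≤ a) := by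
                  rw [List.pairwise_append]; rintro ⟨h1, _, _⟩; exact hN h1
                simp [hviol, hN]
          · -- an alpha run is pending: A checks it now
            have hn0 : nums = [] := by rcases hdisj with h | h; exact absurd h ha0; exact h
            subst hn0
            simp only [pvALoop, hca', Bool.false_eq_true, if_false, hcd, if_true]
            by_cases hA : al.Pairwise (fun a b : Char => b ≤ a)
            · have hc1 : ¬ (al ≠ [] ∧ al ≠ pvSortedDesc al) := by
                rw [pvViol_iff]; exact not_not_intro hA
              rw [if_neg hc1]
              simp only [List.nil_append]
              have hstep := ih [] [c]
                (Or.inl rfl)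
                (by intro x hx; cases hx)
                (by intro x hx; rw [List.mem_singleton.1 hx]; exact hcd)
              rw [hstep]
              rcases hlast : al.getLast? with _ | p
              · exact absurd (List.getLast?_eq_none_iff.1 hlast) ha0
              · have hpa : PySem.Chars.isalpha p = true := hal p (List.mem_of_getLast? hlast)
                simp [pvBLoop, hca', hcd, hpa, hA, hlast]
            · have hc1 : al ≠ [] ∧ al ≠ pvSortedDesc al := (pvViol_iff al).2 hA
              rw [if_pos hc1]
              simp [hA]
        · -- neither alpha nor digit: both loops skip the character
          have hstep := ih al nums hdisj hal hnums
          simp only [pvALoop, hca, hcd, Bool.false_eq_true, if_false] at hstep ⊢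
          rw [hstep]
          by_cases h : al.Pairwise (fun a b : Char => b ≤ a) ∧
              nums.Pairwise (fun a b : Char => b ≤ a)
          · simp [h, pvBLoop, hca, hcd]
          · simp [h]

-- ===== VERDICT (by name: the statement is the Claim_ definition above) =====
theorem advanced_sequence_spec : Claim_equal_advanced_sequence := by
  intro lst _
  unfold Spec_advanced_sequence advanced_sequence advanced_sequence_alt
  rw [pvLoop_eq (lst.flatMap String.toList) [] [] (Or.inl rfl)
      (by intro x hx; cases hx) (by intro x hx; cases hx)]
  simp
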